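-- pv_equiv track=rewrite | github.com/twist13227/CMC_ML | homework2/functions.py | max_prod_mod_3
-- ===== SOURCE A (Python) =====
-- from typing import List
--
-- def max_prod_mod_3(x: List[int]) -> int:
--     """
--     Вернуть максимальное прозведение соседних элементов в массиве x,
--     таких что хотя бы один множитель в произведении делится на 3.
--     Если таких произведений нет, то вернуть -1.
--     """
--     max_prod = None
--     for i in range(len(x) - 1):
--         prod = x[i] * x[i + 1]
--         if prod % 3 == 0:
--             if max_prod is None:
--                 max_prod = prod
--             if prod > max_prod:
--                 max_prod = prod
--     if max_prod is not None:
--         return max_prod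
--     return -1
-- ===== SOURCE B (Python) =====
-- from typing import List
--
-- def max_prod_mod_3(x: List[int]) -> int:
--     # Visit only the multiples of 3; each qualifying adjacent product has
--     # such an element as a factor, so collecting both neighbour products of
--     # every multiple of 3 covers exactly the qualifying pairs.
--     n = len(x)
--     cands = []
--     for i in range(n):
--         if x[i] % 3 == 0:
--             if i > 0:
--                 cands.append(x[i - 1] * x[i])
--             if i < n - 1:
--                 cands.append(x[i] * x[i + 1])
--     return max(cands) if cands else -1
-- ===== Notes on version B (the rewrite author's own statement) =====
-- stated objective: alternative
-- what changed: Instead of scanning every adjacent pair and testing the product for divisibility by 3, B scans for elements divisible by 3 and collects only their neighbour products, then takes one max over that candidate list.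
import Mathlib
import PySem

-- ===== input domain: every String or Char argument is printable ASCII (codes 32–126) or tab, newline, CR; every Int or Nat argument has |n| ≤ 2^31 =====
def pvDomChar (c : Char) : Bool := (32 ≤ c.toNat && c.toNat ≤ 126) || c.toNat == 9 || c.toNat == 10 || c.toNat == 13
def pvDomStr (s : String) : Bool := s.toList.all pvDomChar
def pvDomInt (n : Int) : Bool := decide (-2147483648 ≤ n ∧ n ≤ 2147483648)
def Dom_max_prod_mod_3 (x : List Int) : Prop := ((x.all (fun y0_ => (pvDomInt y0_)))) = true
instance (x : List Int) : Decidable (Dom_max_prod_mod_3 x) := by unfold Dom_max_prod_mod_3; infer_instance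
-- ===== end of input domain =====

-- B scans for the multiples of 3 and collects only their neighbour products instead of
-- testing every adjacent product for divisibility by 3 (alternative decomposition, same cost).

-- ===== PORT A =====
def max_prod_mod_3 (x : List Int) : Int :=
  let mp := (PySem.List.pyRange 0 ((x.length : Int) - 1) 1).foldl
    (fun (mp : Option Int) i =>
      let prod := PySem.List.pyGetD x i 0 * PySem.List.pyGetD x (i + 1) 0
      if PySem.Int.mod prod 3 == 0 then
        let mp := match mp with | none => some prod | some m => some m
        match mp with
        | some m => if prod > m then some prod else some m
        | none => none
      else mp) none
  match mp with
  | some v => v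
  | none => -1

-- ===== PORT B =====
def max_prod_mod_3_alt (x : List Int) : Int :=
  let n : Int := x.length
  let cands := (PySem.List.pyRange 0 n 1).foldl
    (fun (acc : List Int) i =>
      if PySem.Int.mod (PySem.List.pyGetD x i 0) 3 == 0 then
        let acc := if i > 0 then acc ++ [PySem.List.pyGetD x (i - 1) 0 * PySem.List.pyGetD x i 0] else acc
        if i < n - 1 then acc ++ [PySem.List.pyGetD x i 0 * PySem.List.pyGetD x (i + 1) 0] else acc
      else acc) []
  match PySem.List.max? cands (fun y => y) with
  | some v => v
  | none => -1

-- ===== PRECONDITION & SPEC =====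
def Spec_max_prod_mod_3 (x : List Int) (out : Int) : Prop := out = max_prod_mod_3_alt x
instance (x : List Int) (out : Int) : Decidable (Spec_max_prod_mod_3 x out) := by unfold Spec_max_prod_mod_3; infer_instance

-- ===== CLAIM (what is proved, stated in full; the proofs are below) =====
def Claim_equal_max_prod_mod_3 : Prop := ∀ (x : List Int), Dom_max_prod_mod_3 x → Spec_max_prod_mod_3 x (max_prod_mod_3 x)

-- ===== LEMMAS AND PROOFS =====

-- A's candidate multiset: the adjacent products of x that are multiples of 3
def pvPairs (x : List Int) : List Int :=
  ((x.zip x.tail).map (fun q => q.1 * q.2)).filter (fun p => PySem.Int.mod p 3 == 0)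

-- B's candidates contributed by index k (the flatMap view of B's loop)
def pvCand (x : List Int) (k : Nat) : List Int :=
  if PySem.Int.mod (x.getD k 0) 3 == 0 then
    (if 0 < k then [x.getD (k - 1) 0 * x.getD k 0] else []) ++
    (if k + 1 < x.length then [x.getD k 0 * x.getD (k + 1) 0] else [])
  else []

lemma pyGetD_cons_succ (a : Int) (l : List Int) (k : Nat) (d : Int) :
    PySem.List.pyGetD (a :: l) ((k : Int) + 1) d = PySem.List.pyGetD l (k : Int) d := by
  have h : ((k : Int) + 1) = ((k + 1 : Nat) : Int) := by push_cast; ring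
  rw [h, PySem.List.pyGetD_natCast, PySem.List.pyGetD_natCast]
  simp

-- A's index loop over range(len(x)-1) is a structural fold over the adjacent pairs
lemma foldl_adj {β : Type} (g : β → Int → Int → β) :
    ∀ (x : List Int) (init : β),
      (PySem.List.pyRange 0 ((x.length : Int) - 1) 1).foldl
          (fun acc i => g acc (PySem.List.pyGetD x i 0) (PySem.List.pyGetD x (i + 1) 0)) init
        = (x.zip x.tail).foldl (fun acc q => g acc q.1 q.2) init := by
  intro x
  induction x with
  | nil =>
    intro init
    rw [show (((List.nil : List Int).length : Int) - 1) = -1 by simp]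
    rw [PySem.List.pyRange_one_eq_nil (by norm_num)]
    simp
  | cons a t ih =>
    cases t with
    | nil =>
      intro init
      rw [show ((([a] : List Int).length : Int) - 1) = 0 by simp]
      rw [PySem.List.pyRange_one_eq_nil le_rfl]
      simp
    | cons b t2 =>
      intro init
      rw [show (((a :: b :: t2 : List Int).length : Int) - 1) = (t2.length : Int) + 1 by
        simp]
      rw [PySem.List.pyRange_one_cons (by omega)]
      simp only [List.foldl_cons, List.zip_cons_cons, List.tail_cons]
      have h0 : PySem.List.pyGetD (a :: b :: t2) 0 0 = a := by
        simp [PySem.List.pyGetD_ofNat']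
      have h1 : PySem.List.pyGetD (a :: b :: t2) (0 + 1) 0 = b := by
        norm_num [PySem.List.pyGetD_ofNat']
      rw [h0, h1]
      have ih' := ih (g init a b)
      rw [show (((b :: t2 : List Int).length : Int) - 1) = (t2.length : Int) by
        simp] at ih'
      simp only [List.tail_cons] at ih'
      rw [← ih']
      simp only [zero_add]
      rw [PySem.List.pyRange_one 1 ((t2.length : Int) + 1),
          PySem.List.pyRange_one 0 (t2.length : Int)]
      rw [show ((t2.length : Int) + 1 - 1).toNat = t2.length by omega,
          show ((t2.length : Int) - 0).toNat = t2.length by omega]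
      rw [List.foldl_map, List.foldl_map]
      apply PySem.List.foldl_congr_mem
      intro acc k _
      have e1 : (1 : Int) + (k : Int) = (k : Int) + 1 := by ring
      have e2 : (1 : Int) + (k : Int) + 1 = ((k + 1 : Nat) : Int) + 1 := by push_cast; ring
      have e3 : (0 : Int) + (k : Int) = (k : Int) := by ring
      rw [e2, e1, e3, pyGetD_cons_succ a (b :: t2) k, pyGetD_cons_succ a (b :: t2) (k + 1)]
      push_cast
      rfl

-- A's running-maximum step, folded from None, computes max? of the list
lemma foldl_stepA (l : List Int) :
    l.foldl (fun (mp : Option Int) prod =>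
        match (match mp with | none => some prod | some m => some m) with
        | some m => if prod > m then some prod else some m
        | none => none) none
      = PySem.List.max? l (fun y => y) := by
  cases l with
  | nil => rfl
  | cons h t =>
    rw [PySem.List.max?_id_cons]
    simp only [List.foldl_cons]
    have step : ∀ (t : List Int) (m : Int),
        t.foldl (fun (mp : Option Int) prod =>
          match (match mp with | none => some prod | some m => some m) with
          | some m => if prod > m then some prod else some m
          | none => none) (some m) = some (t.foldl max m) := by
      intro t
      induction t with
      | nil => intro m; rfl
      | cons p t ih =>
        intro m
        simp only [List.foldl_cons]
        have e : (if p > m then some p else some m) = some (max m p) := by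
          by_cases h1 : p > m
          · simp only [if_pos h1]
            congr 1
            omega
          · simp only [if_neg h1]
            congr 1
            omega
        rw [e, ih]
    have h0 : (if h > h then some h else some h) = some h := by simp
    rw [h0, step]

-- max? depends only on which values occur in the list
lemma max?_congr (l₁ l₂ : List Int) (h : ∀ a, a ∈ l₁ ↔ a ∈ l₂) :
    PySem.List.max? l₁ (fun y => y) = PySem.List.max? l₂ (fun y => y) := by
  rcases h1 : PySem.List.max? l₁ (fun y => y) with _ | m1
  · rw [PySem.List.max?_eq_none_iff] at h1
    subst h1
    rcases h2 : PySem.List.max? l₂ (fun y => y) with _ | m2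
    · rfl
    · have := PySem.List.max?_mem h2
      simp [← h] at this
  · rcases h2 : PySem.List.max? l₂ (fun y => y) with _ | m2
    · rw [PySem.List.max?_eq_none_iff] at h2
      subst h2
      have := PySem.List.max?_mem h1
      simp [h] at this
    · have hm1 := PySem.List.max?_mem h1
      have hm2 := PySem.List.max?_mem h2
      have le1 := PySem.List.max?_isMax h1 m2 ((h m2).mpr hm2)
      have le2 := PySem.List.max?_isMax h2 m1 ((h m1).mp hm1)
      simp at le1 le2 ⊢
      omega

lemma A_char (x : List Int) :
    max_prod_mod_3 x = (match PySem.List.max? (pvPairs x) (fun y => y) with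
      | some v => v
      | none => -1) := by
  have h1 := foldl_adj (fun (mp : Option Int) a b =>
      if PySem.Int.mod (a * b) 3 == 0 then
        match (match mp with | none => some (a * b) | some m => some m) with
        | some m => if a * b > m then some (a * b) else some m
        | none => none
      else mp) x none
  have h3 : List.foldl
      (fun (acc : Option Int) prod =>
        if PySem.Int.mod prod 3 == 0 then
          match (match acc with | none => some prod | some m => some m) with
          | some m => if prod > m then some prod else some m
          | none => none
        else acc) (none : Option Int) ((x.zip x.tail).map (fun q : Int × Int => q.1 * q.2))
      = List.foldl
      (fun (acc : Option Int) (q : Int × Int) =>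
        if PySem.Int.mod (q.1 * q.2) 3 == 0 then
          match (match acc with | none => some (q.1 * q.2) | some m => some m) with
          | some m => if q.1 * q.2 > m then some (q.1 * q.2) else some m
          | none => none
        else acc) (none : Option Int) (x.zip x.tail) := List.foldl_map
  have h4 := PySem.List.foldl_if_eq_foldl_filter
      (fun prod => PySem.Int.mod prod 3 == 0)
      (fun (acc : Option Int) prod =>
        match (match acc with | none => some prod | some m => some m) with
        | some m => if prod > m then some prod else some m
        | none => none)
      ((x.zip x.tail).map (fun q : Int × Int => q.1 * q.2)) (none : Option Int)
  have h5 := foldl_stepA (pvPairs x)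
  exact congrArg (fun o : Option Int => match o with | some v => v | none => -1)
    (h1.trans (h3.symm.trans (h4.trans h5)))

lemma B_char (x : List Int) :
    max_prod_mod_3_alt x = (match PySem.List.max? ((List.range x.length).flatMap (pvCand x)) (fun y => y) with
      | some v => v
      | none => -1) := by
  have hb : (PySem.List.pyRange 0 ((x.length : Int)) 1).foldl
      (fun (acc : List Int) i =>
        if PySem.Int.mod (PySem.List.pyGetD x i 0) 3 == 0 then
          let acc := if i > 0 then acc ++ [PySem.List.pyGetD x (i - 1) 0 * PySem.List.pyGetD x i 0] else acc
          if i < (x.length : Int) - 1 then acc ++ [PySem.List.pyGetD x i 0 * PySem.List.pyGetD x (i + 1) 0] else acc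
        else acc) []
      = (List.range x.length).flatMap (pvCand x) := by
    rw [PySem.List.pyRange_zero_natCast, List.foldl_map]
    have hcong : ∀ (acc : List Int) (k : Nat), k ∈ List.range x.length →
        (if (PySem.Int.mod (PySem.List.pyGetD x (k : Int) 0) 3 == 0) = true then
          let acc := if (k : Int) > 0 then acc ++ [PySem.List.pyGetD x ((k : Int) - 1) 0 * PySem.List.pyGetD x (k : Int) 0] else acc
          if (k : Int) < (x.length : Int) - 1 then acc ++ [PySem.List.pyGetD x (k : Int) 0 * PySem.List.pyGetD x ((k : Int) + 1) 0] else acc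
        else acc) = acc ++ pvCand x k := by
      intro acc k hk
      have hkn : k < x.length := List.mem_range.mp hk
      have e0 : PySem.List.pyGetD x (k : Int) 0 = x.getD k 0 := PySem.List.pyGetD_natCast x k 0
      have g1 : ((k : Int) > 0) = (0 < k) := by simp
      have g2 : (((k : Int)) < (x.length : Int) - 1) = (k + 1 < x.length) := by simp; omega
      simp only [e0, g1, g2, pvCand]
      by_cases h1 : (PySem.Int.mod (x.getD k 0) 3 == 0) = true
      · simp only [if_pos h1]
        by_cases h2 : 0 < k
        · have e1 : PySem.List.pyGetD x ((k : Int) - 1) 0 = x.getD (k - 1) 0 := by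
            rw [show ((k : Int) - 1) = ((k - 1 : Nat) : Int) by omega, PySem.List.pyGetD_natCast]
          have e2 : PySem.List.pyGetD x ((k : Int) + 1) 0 = x.getD (k + 1) 0 := by
            rw [show ((k : Int) + 1) = ((k + 1 : Nat) : Int) by omega, PySem.List.pyGetD_natCast]
          by_cases h3 : k + 1 < x.length
          · simp [h2, h3, e1, e2]
          · simp [h2, h3, e1]
        · have e2 : PySem.List.pyGetD x ((k : Int) + 1) 0 = x.getD (k + 1) 0 := by
            rw [show ((k : Int) + 1) = ((k + 1 : Nat) : Int) by omega, PySem.List.pyGetD_natCast]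
          by_cases h3 : k + 1 < x.length
          · simp [h2, h3, e2]
          · simp [h2, h3]
      · have h1' : ¬ (3 ∣ x.getD k 0) := by
          simpa [PySem.Int.mod_eq_zero_iff_dvd] using h1
        rw [List.getD_eq_getElem?_getD] at h1'
        simp [h1']
    refine Eq.trans (PySem.List.foldl_congr_mem _ _ _ _ hcong) ?_
    rw [PySem.List.foldl_append_eq_flatMap]
    simp
  show (match PySem.List.max? ((PySem.List.pyRange 0 ((x.length : Int)) 1).foldl _ []) (fun y => y) with
      | some v => v
      | none => -1 : Int) = _
  rw [hb]

lemma mem_pairs (x : List Int) (p : Int) :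
    p ∈ pvPairs x ↔ ∃ i, ∃ h : i + 1 < x.length, p = x[i] * x[i + 1] ∧ 3 ∣ p := by
  rw [pvPairs, List.mem_filter]
  constructor
  · rintro ⟨hm, hd⟩
    rw [List.mem_map] at hm
    obtain ⟨q, hq, rfl⟩ := hm
    obtain ⟨i, hi, hqi⟩ := List.mem_iff_getElem.mp hq
    have hlen : i + 1 < x.length := by
      simp [List.length_zip, List.length_tail] at hi; omega
    have hq1 : q = (x[i], x[i + 1]) := by
      rw [← hqi]
      rw [List.getElem_zip]
      congr 1
      rw [List.getElem_tail]
    refine ⟨i, hlen, ?_, ?_⟩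
    · rw [hq1]
    · rw [← PySem.Int.mod_eq_zero_iff_dvd]
      simpa using hd
  · rintro ⟨i, h, rfl, hd⟩
    constructor
    · rw [List.mem_map]
      refine ⟨(x[i], x[i + 1]), ?_, rfl⟩
      rw [List.mem_iff_getElem]
      refine ⟨i, ?_, ?_⟩
      · simp [List.length_zip, List.length_tail]; omega
      · rw [List.getElem_zip]
        congr 1
        rw [List.getElem_tail]
    · simpa [PySem.Int.mod_eq_zero_iff_dvd] using hd

lemma mem_cands (x : List Int) (p : Int) :
    p ∈ (List.range x.length).flatMap (pvCand x) ↔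
      ∃ k, ∃ h : k < x.length, 3 ∣ x[k] ∧
        ((0 < k ∧ ∃ h' : k - 1 < x.length, p = x[k - 1] * x[k]) ∨
         (∃ h1 : k + 1 < x.length, p = x[k] * x[k + 1])) := by
  rw [List.mem_flatMap]
  constructor
  · rintro ⟨k, hk, hp⟩
    have hkn : k < x.length := List.mem_range.mp hk
    rw [pvCand] at hp
    by_cases hc : (PySem.Int.mod (x.getD k 0) 3 == 0) = true
    · rw [if_pos hc] at hp
      have hdv : 3 ∣ x[k] := by
        rw [← PySem.Int.mod_eq_zero_iff_dvd, ← List.getD_eq_getElem x 0 hkn]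
        simpa using hc
      refine ⟨k, hkn, hdv, ?_⟩
      rw [List.mem_append] at hp
      rcases hp with hp | hp
      · left
        split_ifs at hp with h0
        · simp at hp
          exact ⟨h0, by omega, by simp [hp, hkn, show k - 1 < x.length by omega]⟩
        · simp at hp
      · right
        split_ifs at hp with h1
        · simp at hp
          exact ⟨h1, by simp [hp, hkn, show k + 1 < x.length from h1]⟩
        · simp at hp
    · rw [if_neg hc] at hp
      simp at hp
  · rintro ⟨k, hkn, hdv, hp⟩
    refine ⟨k, List.mem_range.mpr hkn, ?_⟩
    rw [pvCand, if_pos (by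
      rw [List.getD_eq_getElem x 0 hkn]
      simpa [PySem.Int.mod_eq_zero_iff_dvd] using hdv)]
    rw [List.mem_append]
    rcases hp with ⟨h0, h', rfl⟩ | ⟨h1, rfl⟩
    · left
      rw [if_pos h0]
      simp [List.getD_eq_getElem?_getD, hkn, h']
    · right
      rw [if_pos h1]
      simp [List.getD_eq_getElem?_getD, hkn, h1]

-- the two candidate lists contain exactly the same values
lemma mem_equiv (x : List Int) (p : Int) :
    p ∈ pvPairs x ↔ p ∈ (List.range x.length).flatMap (pvCand x) := by
  rw [mem_pairs, mem_cands]
  constructor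
  · rintro ⟨i, h, rfl, hd⟩
    rcases (Int.prime_three.dvd_mul).mp hd with h3 | h3
    · exact ⟨i, by omega, h3, Or.inr ⟨h, rfl⟩⟩
    · refine ⟨i + 1, h, h3, Or.inl ⟨by omega, by omega, by simp⟩⟩
  · rintro ⟨k, hkn, hdv, ⟨h0, h', rfl⟩ | ⟨h1, rfl⟩⟩
    · refine ⟨k - 1, by omega, ?_, Dvd.dvd.mul_left hdv _⟩
      congr 2
      omega
    · exact ⟨k, h1, rfl, Dvd.dvd.mul_right hdv _⟩

-- ===== VERDICT (by name: the statement is the Claim_ definition above) =====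
theorem max_prod_mod_3_spec : Claim_equal_max_prod_mod_3 := by
  intro x _
  show max_prod_mod_3 x = max_prod_mod_3_alt x
  rw [A_char, B_char, max?_congr _ _ (mem_equiv x)]
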